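-- pv_equiv track=rewrite | github.com/daniel-reich/ubiquitous-fiesta | TAhuay457cw5AekBe_3.py | monkey_talk
-- ===== SOURCE A (Python) =====
-- def monkey_talk(txt):
--   l = txt.split(' ')
--   myans = []
--   v = ['a','e','i','o','u']
--   for i in range(len(l)):
--     if l[i][0].lower() in v:
--       if i > 0:
--         myans.append('eek')
--       else:
--         myans.append('Eek')
--     else:
--       if i > 0:
--         myans.append('ook')
--       else:
--         myans.append('Ook')
--   return ' '.join(myans)+'.'
-- ===== SOURCE B (Python) =====
-- def monkey_talk(txt):
--   # Single character-level scan: no split/join, no word list.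
--   # A space is copied through; the first character after a space (or of the
--   # text) selects the token for its whole word; other characters are skipped.
--   out = []
--   first_word = True
--   at_start = True
--   for ch in txt:
--     if ch == ' ':
--       out.append(' ')
--       first_word = False
--       at_start = True
--     elif at_start:
--       tok = 'eek' if ch.lower() in 'aeiou' else 'ook'
--       if first_word:
--         tok = tok[0].upper() + tok[1:]
--       out.append(tok)
--       at_start = False
--   return ''.join(out) + '.'
-- ===== Notes on version B (the rewrite author's own statement) =====
-- stated objective: alternative
-- what changed: Replaces A's split-into-words / indexed loop / join pipeline by a single character-level state-machine scan of the raw text (at_start/first_word flags) that never builds a word list; Pre_ excludes inputs whose space-split contains an empty word, where A raises IndexError.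
-- outside the precondition, e.g. on monkey_talk('a  b'): A raises IndexError, B returns 'Eek  ook.'; on monkey_talk(''): A raises IndexError, B returns '.'
import Mathlib
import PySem

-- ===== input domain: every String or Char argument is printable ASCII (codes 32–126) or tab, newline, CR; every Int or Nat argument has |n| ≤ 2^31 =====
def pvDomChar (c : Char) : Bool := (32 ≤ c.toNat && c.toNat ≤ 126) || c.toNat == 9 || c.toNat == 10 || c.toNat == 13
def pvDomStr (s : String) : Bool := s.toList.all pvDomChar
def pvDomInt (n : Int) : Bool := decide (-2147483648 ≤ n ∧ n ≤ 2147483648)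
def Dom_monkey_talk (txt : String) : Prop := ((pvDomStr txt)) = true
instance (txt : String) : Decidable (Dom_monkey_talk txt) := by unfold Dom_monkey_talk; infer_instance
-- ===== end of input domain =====

-- B replaces A's split-into-words / indexed-loop / join pipeline by a single character-level
-- state-machine scan of the raw text (objective: alternative decomposition, same cost).

-- ===== PORT A =====
def monkey_talk (txt : String) : String :=
  let l := PySem.Chars.splitOn txt.toList [' ']
  let v : List Char := ['a', 'e', 'i', 'o', 'u']
  -- 'for i in range(len(l)): … l[i] …' ported as a fold over the (index, element) pairs;
  -- l[i][0] is PySem.List.pyGet?; its 'none' (IndexError on an empty word) is excluded by Pre_.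
  let myans := (PySem.List.enumerate l 0).foldl (fun acc p =>
    if PySem.Chars.lowerChar ((PySem.List.pyGet? p.2 0).getD ' ') ∈ v then
      (if p.1 > 0 then acc ++ [['e', 'e', 'k']] else acc ++ [['E', 'e', 'k']])
    else
      (if p.1 > 0 then acc ++ [['o', 'o', 'k']] else acc ++ [['O', 'o', 'k']])) []
  String.mk (PySem.Chars.join [' '] myans ++ ['.'])

-- ===== PORT B =====
-- the loop body of B's scan: state = (out pieces, first_word, at_start)
def pvStep (st : List (List Char) × Bool × Bool) (ch : Char) :
    List (List Char) × Bool × Bool :=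
  if ch = ' ' then (st.1 ++ [[' ']], false, true)
  else if st.2.2 then
    let tok : List Char :=
      if PySem.Chars.lowerChar ch ∈ (['a', 'e', 'i', 'o', 'u'] : List Char) then
        ['e', 'e', 'k'] else ['o', 'o', 'k']
    -- tok[0].upper() + tok[1:]
    let tok' : List Char :=
      if st.2.1 then
        [PySem.Chars.upperChar ((PySem.List.pyGet? tok 0).getD ' ')] ++
          PySem.List.slice tok (some 1) none
      else tok
    (st.1 ++ [tok'], st.2.1, false)
  else st

def monkey_talk_alt (txt : String) : String :=
  let r := txt.toList.foldl pvStep ([], true, true)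
  -- ''.join(out) is plain concatenation of the pieces: ported as flatten (exact)
  String.mk (r.1.flatten ++ ['.'])

-- ===== PRECONDITION & SPEC =====
-- Pre_ excludes exactly the inputs whose space-split contains an empty word, on which A
-- raises IndexError at l[i][0].
def Pre_monkey_talk (txt : String) : Prop :=
  ∀ w ∈ PySem.Chars.splitOn txt.toList [' '], w ≠ []
instance (txt : String) : Decidable (Pre_monkey_talk txt) := by unfold Pre_monkey_talk; infer_instance
def pvWitness_monkey_talk : String := "hello good world"

def Spec_monkey_talk (txt : String) (out : String) : Prop := out = monkey_talk_alt txt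
instance (txt : String) (out : String) : Decidable (Spec_monkey_talk txt out) := by unfold Spec_monkey_talk; infer_instance

-- ===== CLAIM (what is proved, stated in full; the proofs are below) =====
def Claim_equal_monkey_talk : Prop := ∀ (txt : String), Dom_monkey_talk txt → Pre_monkey_talk txt → Spec_monkey_talk txt (monkey_talk txt)

-- ===== LEMMAS AND PROOFS =====

-- structural split on ' ' (first piece, later pieces)
def pvSplit : List Char → List Char × List (List Char)
  | [] => ([], [])
  | c :: r =>
    let p := pvSplit r
    if c = ' ' then ([], p.1 :: p.2) else (c :: p.1, p.2)

lemma pv_go_spec : ∀ (l : List Char) (fuel : Nat), l.length ≤ fuel → ∀ (cur : List Char) (acc : List (List Char)),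
    PySem.Chars.splitOn.go [' '] (fuel + 1) l cur acc
      = acc.reverse ++ (cur.reverse ++ (pvSplit l).1) :: (pvSplit l).2 := by
  intro l
  induction l with
  | nil => intro fuel _ cur acc; simp [PySem.Chars.splitOn.go, pvSplit]
  | cons c rest ih =>
    intro fuel hf cur acc
    obtain ⟨m, rfl⟩ : ∃ m, fuel = m + 1 := by
      cases fuel with
      | zero => simp at hf
      | succ m => exact ⟨m, rfl⟩
    have hm : rest.length ≤ m := by simpa using hf
    simp only [PySem.Chars.splitOn.go]
    by_cases hc : c = ' '
    · subst hc
      rw [if_pos (show ([' '] : List Char).isPrefixOf (' ' :: rest) = true by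
        simp [List.isPrefixOf])]
      rw [show List.drop ([' '] : List Char).length (' ' :: rest) = rest by simp]
      rw [ih m hm [] (cur.reverse :: acc)]
      simp [pvSplit]
    · rw [if_neg (show ¬ ([' '] : List Char).isPrefixOf (c :: rest) = true by
        simp only [List.isPrefixOf, Bool.and_eq_true, beq_iff_eq]
        intro h
        exact hc h.1.symm)]
      rw [ih m hm (c :: cur) acc]
      simp [pvSplit, hc]

lemma pv_splitOn_eq (cs : List Char) :
    PySem.Chars.splitOn cs [' '] = (pvSplit cs).1 :: (pvSplit cs).2 := by
  unfold PySem.Chars.splitOn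
  simpa using pv_go_spec cs cs.length le_rfl [] []

-- joining the pieces back with single spaces
def pvInterc : List (List Char) → List Char
  | [] => []
  | [w] => w
  | w :: ws => w ++ ' ' :: pvInterc ws

lemma pvInterc_cons_char (c : Char) (h : List Char) (t : List (List Char)) :
    pvInterc ((c :: h) :: t) = c :: pvInterc (h :: t) := by
  cases t <;> simp [pvInterc]

lemma pvSplit_interc (cs : List Char) :
    pvInterc ((pvSplit cs).1 :: (pvSplit cs).2) = cs := by
  induction cs with
  | nil => simp [pvSplit, pvInterc]
  | cons c r ih =>
    by_cases hc : c = ' '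
    · subst hc; simp only [pvSplit, if_pos rfl]
      simpa [pvInterc] using ih
    · simp only [pvSplit, if_neg hc]
      rw [pvInterc_cons_char]
      simpa using ih

lemma pvSplit_no_space (cs : List Char) :
    ' ' ∉ (pvSplit cs).1 ∧ ∀ w ∈ (pvSplit cs).2, ' ' ∉ w := by
  induction cs with
  | nil => simp [pvSplit]
  | cons c r ih =>
    by_cases hc : c = ' '
    · subst hc; simp only [pvSplit, if_pos rfl]
      exact ⟨by simp, by
        intro w hw
        rcases List.mem_cons.mp hw with h | h
        · exact h ▸ ih.1
        · exact ih.2 w h⟩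
    · simp only [pvSplit, if_neg hc]
      exact ⟨by
        intro h
        rcases List.mem_cons.mp h with h | h
        · exact hc h.symm
        · exact ih.1 h, ih.2⟩

-- the token a word beginning with character c contributes (first = still the first word)
def pvTok (first : Bool) (c : Char) : List Char :=
  if PySem.Chars.lowerChar c ∈ (['a', 'e', 'i', 'o', 'u'] : List Char) then
    (if first then ['E', 'e', 'k'] else ['e', 'e', 'k'])
  else
    (if first then ['O', 'o', 'k'] else ['o', 'o', 'k'])

lemma pyGet_zero_headD (w : List Char) :
    (PySem.List.pyGet? w 0).getD ' ' = w.headD ' ' := by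
  cases w <;> simp [PySem.List.pyGet?, PySem.List.pyIdx?]

-- ----- B-side lemmas -----

lemma pvStep_space (st : List (List Char) × Bool × Bool) :
    pvStep st ' ' = (st.1 ++ [[' ']], false, true) := by
  simp [pvStep]

lemma pvStep_nonspace_skip (out : List (List Char)) (first : Bool) (c : Char) (hc : c ≠ ' ') :
    pvStep (out, first, false) c = (out, first, false) := by
  simp [pvStep, hc]

lemma pvFold_skip (rest : List Char) (hns : ' ' ∉ rest) (out : List (List Char)) (first : Bool) :
    rest.foldl pvStep (out, first, false) = (out, first, false) := by
  induction rest with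
  | nil => rfl
  | cons c r ih =>
    have hc : c ≠ ' ' := fun h => hns (h ▸ List.mem_cons_self ..)
    rw [List.foldl_cons, pvStep_nonspace_skip _ _ _ hc]
    exact ih (fun h => hns (List.mem_cons_of_mem _ h))

lemma pvStep_start (out : List (List Char)) (first : Bool) (c : Char) (hc : c ≠ ' ') :
    pvStep (out, first, true) c = (out ++ [pvTok first c], first, false) := by
  by_cases hv : PySem.Chars.lowerChar c ∈ (['a', 'e', 'i', 'o', 'u'] : List Char) <;>
    cases first <;>
      simp [pvStep, hc, hv, pvTok, PySem.List.pyGet?, PySem.List.pyIdx?, PySem.List.slice] <;>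
      decide

lemma pvFold_word (w : List Char) (hw : w ≠ []) (hns : ' ' ∉ w)
    (out : List (List Char)) (first : Bool) :
    w.foldl pvStep (out, first, true) = (out ++ [pvTok first (w.headD ' ')], first, false) := by
  cases w with
  | nil => exact absurd rfl hw
  | cons c rest =>
    have hc : c ≠ ' ' := fun h => hns (h ▸ List.mem_cons_self ..)
    rw [List.foldl_cons, pvStep_start _ _ _ hc]
    rw [pvFold_skip rest (fun h => hns (List.mem_cons_of_mem _ h))]
    simp

-- output pieces for the words after the first
def pvOuts : List (List Char) → List (List Char)
  | [] => []
  | [w] => [pvTok false (w.headD ' ')]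
  | w :: ws => pvTok false (w.headD ' ') :: [' '] :: pvOuts ws

lemma pvFold_tail : ∀ (ws : List (List Char)), ws ≠ [] →
    (∀ w ∈ ws, w ≠ [] ∧ ' ' ∉ w) → ∀ (out : List (List Char)),
    (pvInterc ws).foldl pvStep (out, false, true) = (out ++ pvOuts ws, false, false) := by
  intro ws
  induction ws with
  | nil => intro h; exact absurd rfl h
  | cons w t ih =>
    intro _ hws out
    have hw := hws w (List.mem_cons_self ..)
    cases t with
    | nil =>
      simp only [pvInterc, pvOuts]
      exact pvFold_word w hw.1 hw.2 out false
    | cons q t' =>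
      simp only [pvInterc, pvOuts]
      rw [List.foldl_append, pvFold_word w hw.1 hw.2 out false, List.foldl_cons,
        pvStep_space]
      rw [ih (by simp) (fun x hx => hws x (List.mem_cons_of_mem _ hx))]
      simp

-- ----- A-side lemma: the indexed loop produces the token list -----

lemma pvA_loop_tail (t : List (List Char)) :
    ∀ (i : Int), 0 < i → ∀ (acc : List (List Char)),
      (PySem.List.enumerate t i).foldl (fun acc p =>
        if PySem.Chars.lowerChar ((PySem.List.pyGet? p.2 0).getD ' ') ∈ (['a', 'e', 'i', 'o', 'u'] : List Char) then
          (if p.1 > 0 then acc ++ [['e', 'e', 'k']] else acc ++ [['E', 'e', 'k']])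
        else
          (if p.1 > 0 then acc ++ [['o', 'o', 'k']] else acc ++ [['O', 'o', 'k']])) acc
      = acc ++ t.map (fun w => pvTok false (w.headD ' ')) := by
  induction t with
  | nil => intro i hi acc; simp [PySem.List.enumerate]
  | cons w t ih =>
    intro i hi acc
    rw [PySem.List.enumerate_cons]
    simp only [List.foldl_cons]
    rw [ih (i + 1) (by omega)]
    rw [pyGet_zero_headD]
    by_cases h : PySem.Chars.lowerChar (w.headD ' ') ∈ (['a', 'e', 'i', 'o', 'u'] : List Char)
    · have htok : pvTok false (w.headD ' ') = ['e', 'e', 'k'] := by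
        unfold pvTok; rw [if_pos h]; rfl
      rw [if_pos h, if_pos (show ((i, w).1 > 0) from hi), List.map_cons, htok]
      simp
    · have htok : pvTok false (w.headD ' ') = ['o', 'o', 'k'] := by
        unfold pvTok; rw [if_neg h]; rfl
      rw [if_neg h, if_pos (show ((i, w).1 > 0) from hi), List.map_cons, htok]
      simp

-- joining B's output pieces equals A's space-join of the tokens
lemma pvOuts_flatten : ∀ (ws : List (List Char)), ws ≠ [] →
    (pvOuts ws).flatten = PySem.Chars.join [' '] (ws.map (fun w => pvTok false (w.headD ' '))) := by
  intro ws
  induction ws with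
  | nil => intro h; exact absurd rfl h
  | cons w t ih =>
    intro _
    cases t with
    | nil => simp [pvOuts, PySem.Chars.join_singleton]
    | cons q t' =>
      show (pvTok false (w.headD ' ') :: [' '] :: pvOuts (q :: t')).flatten = _
      rw [List.flatten_cons, List.flatten_cons, ih (by simp)]
      simp only [List.map_cons]
      rw [PySem.Chars.join_cons_cons]
      simp

-- ===== VERDICT (by name: the statement is the Claim_ definition above) =====
theorem monkey_talk_spec : Claim_equal_monkey_talk := by
  intro txt _ hpre
  unfold Spec_monkey_talk monkey_talk monkey_talk_alt
  simp only []
  have hsp := pv_splitOn_eq txt.toList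
  obtain ⟨h, t, hsplit⟩ : ∃ h t, PySem.Chars.splitOn txt.toList [' '] = h :: t :=
    ⟨_, _, hsp⟩
  have hh : h ≠ [] := by
    apply hpre; rw [hsplit]; exact List.mem_cons_self ..
  have ht : ∀ w ∈ t, w ≠ [] := by
    intro w hw; apply hpre; rw [hsplit]; exact List.mem_cons_of_mem _ hw
  have hns := pvSplit_no_space txt.toList
  have hh1 : (pvSplit txt.toList).1 = h := by
    have := hsp.symm.trans hsplit; exact (List.cons.injEq .. ▸ this).1
  have ht1 : (pvSplit txt.toList).2 = t := by
    have := hsp.symm.trans hsplit; exact (List.cons.injEq .. ▸ this).2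
  have hhns : ' ' ∉ h := hh1 ▸ hns.1
  have htns : ∀ w ∈ t, ' ' ∉ w := ht1 ▸ hns.2
  have hrecon : pvInterc (h :: t) = txt.toList := by
    rw [← hh1, ← ht1]; exact pvSplit_interc txt.toList
  -- A side
  rw [hsplit, PySem.List.enumerate_cons, List.foldl_cons]
  rw [pyGet_zero_headD]
  -- evaluate A's first iteration (index 0)
  have h0 : ¬ (((0 : Int), h).1 > 0) := by norm_num
  have hAfirst : ∀ (hd : Char),
      (if PySem.Chars.lowerChar hd ∈ (['a', 'e', 'i', 'o', 'u'] : List Char) then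
        (if ((0:Int), h).1 > 0 then ([]: List (List Char)) ++ [['e','e','k']] else [] ++ [['E','e','k']])
      else
        (if ((0:Int), h).1 > 0 then ([]: List (List Char)) ++ [['o','o','k']] else [] ++ [['O','o','k']]))
      = [pvTok true hd] := by
    intro hd
    by_cases hv : PySem.Chars.lowerChar hd ∈ (['a', 'e', 'i', 'o', 'u'] : List Char)
    · have htok : pvTok true hd = ['E', 'e', 'k'] := by
        unfold pvTok; rw [if_pos hv]; rfl
      rw [if_pos hv, if_neg h0, htok]
      rfl
    · have htok : pvTok true hd = ['O', 'o', 'k'] := by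
        unfold pvTok; rw [if_neg hv]; rfl
      rw [if_neg hv, if_neg h0, htok]
      rfl
  rw [hAfirst (h.headD ' '), pvA_loop_tail t (0 + 1) (by omega)]
  -- B side
  rw [← hrecon]
  cases t with
  | nil =>
    simp only [pvInterc]
    rw [pvFold_word h hh hhns [] true]
    simp [PySem.Chars.join_singleton]
  | cons q t' =>
    simp only [pvInterc]
    rw [List.foldl_append, pvFold_word h hh hhns [] true, List.foldl_cons, pvStep_space]
    rw [pvFold_tail (q :: t') (by simp)
      (fun w hw => ⟨ht w hw, htns w hw⟩)]
    simp only [List.flatten_append, List.flatten_cons, List.flatten_nil]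
    rw [pvOuts_flatten (q :: t') (by simp)]
    simp only [List.map_cons, List.singleton_append, List.nil_append, List.append_nil]
    rw [PySem.Chars.join_cons_cons]
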